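-- pv_equiv track=rewrite | github.com/abdelfattah-lab/SplitReason | annotated_dataset/data_generator.py | annotate_hard_sentences
-- ===== SOURCE A (Python) =====
-- def annotate_hard_sentences(original_substrings, hard_indices_set):
--     """
--     Insert <B> and <EoB> around each substring (sentence) whose
--     index is in `hard_indices_set`. We do NOT alter any other chars.
--
--     Return a *single* string that is the concatenation of the original
--     substrings with <B>/<EoB> inserted.
--     """
--     annotated = []
--     for i, chunk in enumerate(original_substrings):
--         if i in hard_indices_set:
--             annotated.append(f"<B>{chunk}<EoB>")
--         else:
--             annotated.append(chunk)
--     # Simply join with no extra separator -> preserves all internal text as-is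
--     return "".join(annotated)
-- ===== SOURCE B (Python) =====
-- def annotate_hard_sentences(original_substrings, hard_indices_set):
--     """Copy the chunks, then mutate only the targeted indices and join."""
--     chunks = list(original_substrings)
--     for i in hard_indices_set:
--         if 0 <= i < len(chunks):
--             chunks[i] = f"<B>{original_substrings[i]}<EoB>"
--     return "".join(chunks)
-- ===== Notes on version B (the rewrite author's own statement) =====
-- stated objective: alternative
-- what changed: Instead of scanning every chunk and testing membership in hard_indices_set per element, B copies the chunk list once and iterates over hard_indices_set, overwriting only in-range targeted slots, then joins.
import Mathlib
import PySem

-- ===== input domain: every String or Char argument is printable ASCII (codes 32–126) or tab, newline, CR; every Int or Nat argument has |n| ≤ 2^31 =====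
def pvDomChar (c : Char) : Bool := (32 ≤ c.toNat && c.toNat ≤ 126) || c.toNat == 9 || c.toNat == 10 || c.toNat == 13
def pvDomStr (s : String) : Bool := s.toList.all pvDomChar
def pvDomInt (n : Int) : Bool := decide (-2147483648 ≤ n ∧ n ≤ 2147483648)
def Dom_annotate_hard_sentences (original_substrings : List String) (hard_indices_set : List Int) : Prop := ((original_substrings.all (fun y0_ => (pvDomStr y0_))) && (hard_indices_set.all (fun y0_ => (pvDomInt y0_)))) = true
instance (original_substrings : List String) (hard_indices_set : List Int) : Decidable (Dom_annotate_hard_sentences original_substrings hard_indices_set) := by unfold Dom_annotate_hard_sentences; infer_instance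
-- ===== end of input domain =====

-- B replaces A's branch-per-element scan by a copy-then-targeted-mutation pass driven by the index list (alternative decomposition, same result).

-- ===== PORT A =====
-- literal transliteration of A: enumerate, append wrapped or plain chunk, join
def annotate_hard_sentences (original_substrings : List String) (hard_indices_set : List Int) : String :=
  let annotated := (PySem.List.enumerate original_substrings).foldl
    (fun acc p => acc ++ [if p.1 ∈ hard_indices_set then "<B>" ++ p.2 ++ "<EoB>" else p.2]) []
  PySem.Str.join "" annotated

-- ===== PORT B =====
-- literal transliteration of Source B: copy the list, mutate in-range targeted slots, join
def annotate_hard_sentences_alt (original_substrings : List String) (hard_indices_set : List Int) : String :=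
  let chunks := hard_indices_set.foldl
    (fun cs i =>
      if 0 ≤ i ∧ i < (cs.length : Int) then
        cs.set i.toNat ("<B>" ++ original_substrings.getD i.toNat "" ++ "<EoB>")
      else cs)
    original_substrings
  PySem.Str.join "" chunks

-- ===== PRECONDITION & SPEC =====
def Spec_annotate_hard_sentences (original_substrings : List String) (hard_indices_set : List Int) (out : String) : Prop := out = annotate_hard_sentences_alt original_substrings hard_indices_set
instance (original_substrings : List String) (hard_indices_set : List Int) (out : String) : Decidable (Spec_annotate_hard_sentences original_substrings hard_indices_set out) := by unfold Spec_annotate_hard_sentences; infer_instance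

-- ===== CLAIM (what is proved, stated in full; the proofs are below) =====
def Claim_equal_annotate_hard_sentences : Prop := ∀ (original_substrings : List String) (hard_indices_set : List Int), Dom_annotate_hard_sentences original_substrings hard_indices_set → Spec_annotate_hard_sentences original_substrings hard_indices_set (annotate_hard_sentences original_substrings hard_indices_set)

-- ===== LEMMAS AND PROOFS =====

-- A's accumulator loop is a map over the enumeration
lemma foldA_eq_map (his : List Int) (l : List (Int × String)) (acc : List String) :
    l.foldl (fun acc p => acc ++ [if p.1 ∈ his then "<B>" ++ p.2 ++ "<EoB>" else p.2]) acc
      = acc ++ l.map (fun p => if p.1 ∈ his then "<B>" ++ p.2 ++ "<EoB>" else p.2) := by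
  induction l generalizing acc with
  | nil => simp
  | cons p l ih => simp [List.foldl_cons, ih]

-- characterization of B's fold, element by element
lemma foldB_getElem (os : List String) (his : List Int) :
    ∀ (cs : List String), cs.length = os.length → ∀ j : Nat,
      (his.foldl (fun cs i =>
          if 0 ≤ i ∧ i < (cs.length : Int) then
            cs.set i.toNat ("<B>" ++ os.getD i.toNat "" ++ "<EoB>")
          else cs) cs)[j]?
        = if (j : Int) ∈ his ∧ j < os.length
          then some ("<B>" ++ os.getD j "" ++ "<EoB>") else cs[j]? := by
  induction his with
  | nil => intro cs hlen j; simp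
  | cons i his ih =>
    intro cs hlen j
    rw [List.foldl_cons]
    by_cases hg : 0 ≤ i ∧ i < (cs.length : Int)
    · rw [if_pos hg]
      have hlen' : (cs.set i.toNat ("<B>" ++ os.getD i.toNat "" ++ "<EoB>")).length = os.length := by
        simp [hlen]
      rw [ih _ hlen' j]
      by_cases hji : (j : Int) = i
      · have hjn : i.toNat = j := by omega
        have hjlt : j < os.length := by omega
        have hset : (cs.set i.toNat ("<B>" ++ os.getD i.toNat "" ++ "<EoB>"))[j]? = some ("<B>" ++ os.getD j "" ++ "<EoB>") := by
          rw [List.getElem?_set]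
          simp [hjn, hlen ▸ hjlt]
        have hRHS : ((j : Int) ∈ i :: his ∧ j < os.length) := ⟨by simp [hji], hjlt⟩
        rw [if_pos hRHS]
        by_cases hm : (j : Int) ∈ his
        · rw [if_pos ⟨hm, hjlt⟩]
        · rw [if_neg (by tauto), hset]
      · have hset : (cs.set i.toNat ("<B>" ++ os.getD i.toNat "" ++ "<EoB>"))[j]? = cs[j]? := by
          rw [List.getElem?_set]
          have : ¬ i.toNat = j := by omega
          simp [this]
        rw [hset]
        by_cases hm : (j : Int) ∈ his
        · have : (j : Int) ∈ i :: his := by simp [hm]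
          simp [hm, this]
        · have : ((j : Int) ∈ i :: his) ↔ False := by simp [hm, hji]
          simp [hm, this]
    · rw [if_neg hg]
      rw [ih _ hlen j]
      by_cases hm : (j : Int) ∈ his
      · have : (j : Int) ∈ i :: his := by simp [hm]
        simp [hm, this]
      · by_cases hji : (j : Int) = i
        · -- i = j but guard failed, so j out of range (using cs.length = os.length)
          have hout : ¬ j < os.length := by omega
          have : ((j : Int) ∈ i :: his) := by simp [hji]
          simp [hm, hji, hout, this]
        · have : ((j : Int) ∈ i :: his) ↔ False := by simp [hm, hji]
          simp [hm, this]

-- the two chunk lists are equal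
lemma chunks_eq (os : List String) (his : List Int) :
    (PySem.List.enumerate os).map
        (fun p => if p.1 ∈ his then "<B>" ++ p.2 ++ "<EoB>" else p.2)
      = his.foldl (fun cs i =>
          if 0 ≤ i ∧ i < (cs.length : Int) then
            cs.set i.toNat ("<B>" ++ os.getD i.toNat "" ++ "<EoB>")
          else cs) os := by
  apply List.ext_getElem?
  intro j
  rw [foldB_getElem os his os rfl j]
  rw [List.getElem?_map, PySem.List.getElem?_enumerate]
  by_cases hj : j < os.length
  · have : os[j]? = some os[j] := List.getElem?_eq_getElem hj
    by_cases hm : (j : Int) ∈ his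
    · simp [this, hm, hj, List.getD_eq_getElem?_getD]
    · simp [this, hm, hj]
  · have : os[j]? = none := List.getElem?_eq_none (by omega)
    simp [this, hj]

-- ===== VERDICT (by name: the statement is the Claim_ definition above) =====
theorem annotate_hard_sentences_spec : Claim_equal_annotate_hard_sentences := by
  intro os his _
  show annotate_hard_sentences os his = annotate_hard_sentences_alt os his
  unfold annotate_hard_sentences annotate_hard_sentences_alt
  rw [foldA_eq_map, List.nil_append, chunks_eq]
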